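-- pv_equiv track=rewrite | github.com/pypi-data/pypi-mirror-52 | packages/beams/beams-0.1.0.tar.gz/beams-0.1.0/beams/shapes.py | get_overlap_groups
-- ===== SOURCE A (Python) =====
-- def get_overlap_groups(overlap_idx):
--     all_idx = list(overlap_idx.keys())
--     added_idx = []
--     all_groups = []
--     while all_idx:
--         grp = []
--         for i, i_overlap in overlap_idx.items():
--             if i in added_idx:
--                 continue
--             add = True
--             for j in grp:
--                 if j in i_overlap:
--                     add = False
--                     break
--             if add:
--                 grp.append(i)
--                 added_idx.append(i)
--                 all_idx.remove(i)
--         all_groups.append(grp)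
--     return all_groups
-- ===== SOURCE B (Python) =====
-- def get_overlap_groups(overlap_idx):
--     groups = []
--     for i, i_overlap in overlap_idx.items():
--         for g in groups:
--             if all(j not in i_overlap for j in g):
--                 g.append(i)
--                 break
--         else:
--             groups.append([i])
--     return groups
-- ===== Notes on version B (the rewrite author's own statement) =====
-- stated objective: simpler
-- what changed: Replaced A's outer while-loop over repeated full passes (with a global added-set and list removal) by a single first-fit pass: each index goes into the first existing group with no conflicting member, else opens a new group.
import Mathlib
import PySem

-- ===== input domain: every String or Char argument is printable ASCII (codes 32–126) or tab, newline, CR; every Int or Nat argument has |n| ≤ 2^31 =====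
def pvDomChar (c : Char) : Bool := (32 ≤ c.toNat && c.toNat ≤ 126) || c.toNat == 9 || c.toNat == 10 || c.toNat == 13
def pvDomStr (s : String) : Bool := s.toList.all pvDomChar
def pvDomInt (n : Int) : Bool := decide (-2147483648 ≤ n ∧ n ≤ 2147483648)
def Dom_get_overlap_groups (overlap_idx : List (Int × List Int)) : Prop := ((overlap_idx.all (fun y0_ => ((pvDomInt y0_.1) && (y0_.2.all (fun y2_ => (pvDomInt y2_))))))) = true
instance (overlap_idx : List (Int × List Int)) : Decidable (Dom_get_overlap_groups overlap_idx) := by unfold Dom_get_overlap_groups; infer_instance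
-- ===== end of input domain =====

-- B replaces A's repeated full passes (while-loop + added-set + removal from all_idx) by a
-- single first-fit pass over the dict items; objective: simpler.

-- ===== PORT A =====
-- inner `for j in grp: if j in i_overlap: add = False; break` of A, as a flag loop
def pvInnerAdd (grp : List Int) (ov : List Int) : Bool :=
  match grp with
  | [] => true
  | j :: rest => if ov.contains j then false else pvInnerAdd rest ov

-- one `for i, i_overlap in overlap_idx.items():` pass of A; state (grp, added_idx, all_idx)
def pvPassA (items : List (Int × List Int)) (grp added allIdx : List Int) :
    List Int × List Int × List Int :=
  match items with
  | [] => (grp, added, allIdx)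
  | (i, ov) :: t =>
    if added.contains i then pvPassA t grp added allIdx
    else if pvInnerAdd grp ov then pvPassA t (grp ++ [i]) (added ++ [i]) (allIdx.erase i)
    else pvPassA t grp added allIdx

-- the `while all_idx:` loop of A; the fuel only makes it total (under Pre_ it never runs out)
def pvLoopA (fuel : Nat) (items : List (Int × List Int)) (added allIdx : List Int)
    (groups : List (List Int)) : List (List Int) :=
  match fuel with
  | 0 => groups
  | fuel + 1 =>
    if allIdx.isEmpty then groups
    else
      let r := pvPassA items [] added allIdx
      pvLoopA fuel items r.2.1 r.2.2 (groups ++ [r.1])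

def get_overlap_groups (overlap_idx : List (Int × List Int)) : List (List Int) :=
  let allIdx := overlap_idx.map Prod.fst
  pvLoopA allIdx.length overlap_idx [] allIdx []

-- ===== PORT B =====
-- drop i into the first group with no conflicting member, else open a new group
def pvPlace (groups : List (List Int)) (i : Int) (ov : List Int) : List (List Int) :=
  match groups with
  | [] => [[i]]
  | g :: gs =>
    if g.all (fun j => !(ov.contains j)) then (g ++ [i]) :: gs
    else g :: pvPlace gs i ov

def get_overlap_groups_alt (overlap_idx : List (Int × List Int)) : List (List Int) :=
  overlap_idx.foldl (fun groups p => pvPlace groups p.1 p.2) []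

-- ===== PRECONDITION & SPEC =====
-- Pre_: the argument represents a Python dict, so its keys are pairwise distinct
-- (an association list with duplicate keys does not arise from any dict input to A).
def Pre_get_overlap_groups (overlap_idx : List (Int × List Int)) : Prop :=
  (overlap_idx.map Prod.fst).Nodup
instance (overlap_idx : List (Int × List Int)) : Decidable (Pre_get_overlap_groups overlap_idx) := by unfold Pre_get_overlap_groups; infer_instance

def pvWitness_get_overlap_groups : (List (Int × List Int)) :=
  [(1, [2]), (2, [1]), (3, [])]

def Spec_get_overlap_groups (overlap_idx : List (Int × List Int)) (out : List (List Int)) : Prop := out = get_overlap_groups_alt overlap_idx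
instance (overlap_idx : List (Int × List Int)) (out : List (List Int)) : Decidable (Spec_get_overlap_groups overlap_idx out) := by unfold Spec_get_overlap_groups; infer_instance

-- ===== CLAIM (what is proved, stated in full; the proofs are below) =====
def Claim_equal_get_overlap_groups : Prop := ∀ (overlap_idx : List (Int × List Int)), Dom_get_overlap_groups overlap_idx → Pre_get_overlap_groups overlap_idx → Spec_get_overlap_groups overlap_idx (get_overlap_groups overlap_idx)

-- ===== LEMMAS AND PROOFS =====

-- proof-only helper: one greedy pass over t extending group g, returning the keys it
-- picks (in order) and the remaining items (in order)
def pvPass (g : List Int) (t : List (Int × List Int)) : List Int × List (Int × List Int) :=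
  match t with
  | [] => ([], [])
  | (i, ov) :: t' =>
    if g.all (fun j => !(ov.contains j)) then
      let r := pvPass (g ++ [i]) t'
      (i :: r.1, r.2)
    else
      let r := pvPass g t'
      (r.1, (i, ov) :: r.2)

lemma pvInnerAdd_eq_all (grp ov : List Int) :
    pvInnerAdd grp ov = grp.all (fun j => !(ov.contains j)) := by
  induction grp with
  | nil => rfl
  | cons j rest ih =>
    simp only [pvInnerAdd, List.all_cons, ih]
    by_cases h : ov.contains j <;> simp [h]

lemma pvPass_fst_subset (g : List Int) (t : List (Int × List Int)) :
    ∀ x ∈ (pvPass g t).1, x ∈ t.map Prod.fst := by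
  induction t generalizing g with
  | nil => simp [pvPass]
  | cons p t' ih =>
    obtain ⟨i, ov⟩ := p
    intro x hx
    simp only [pvPass] at hx
    split at hx
    · simp only [List.mem_cons] at hx
      rcases hx with rfl | hx
      · simp
      · simpa using Or.inr (ih _ x hx)
    · simpa using Or.inr (ih _ x hx)

lemma pvPass_snd_eq (g : List Int) (t : List (Int × List Int))
    (hnd : (t.map Prod.fst).Nodup) :
    (pvPass g t).2 = t.filter (fun p => !((pvPass g t).1.contains p.1)) := by
  induction t generalizing g with
  | nil => simp [pvPass]
  | cons p t' ih =>
    obtain ⟨i, ov⟩ := p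
    simp only [List.map_cons, List.nodup_cons] at hnd
    obtain ⟨hi, hnd'⟩ := hnd
    simp only [pvPass]
    split
    · have hiS : ¬ i ∈ (pvPass (g ++ [i]) t').1 := fun h => hi (pvPass_fst_subset _ _ _ h)
      rw [ih _ hnd']
      simp only [List.filter_cons]
      simp only [List.contains_cons, BEq.rfl, Bool.true_or, Bool.not_true]
      simp only [show ∀ (a b : List (Int×List Int)), (if false = true then a else b) = b from fun a b => rfl]
      apply List.filter_congr
      intro p hp
      have hpi : (p.1 == i) = false := by
        simp only [beq_eq_false_iff_ne]
        intro h; exact hi (h ▸ (List.mem_map.mpr ⟨p, hp, rfl⟩))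
      simp [List.contains_cons, hpi]
    · have hiS : i ∉ (pvPass g t').1 := fun h => hi (pvPass_fst_subset _ _ _ h)
      rw [ih _ hnd']
      simp [List.filter_cons, hiS]

lemma foldl_erase_cons_of_not_mem (S : List Int) :
    ∀ (l : List Int) (i : Int), i ∉ S →
      S.foldl (fun l a => l.erase a) (i :: l) = i :: S.foldl (fun l a => l.erase a) l := by
  induction S with
  | nil => intro l i _; rfl
  | cons a S' ih =>
    intro l i hi
    simp only [List.mem_cons, not_or] at hi
    simp only [List.foldl_cons]
    rw [show (i :: l).erase a = i :: l.erase a by simp [List.erase_cons, hi.1]]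
    exact ih _ _ hi.2

lemma pvPass_erase (g : List Int) (t : List (Int × List Int))
    (hnd : (t.map Prod.fst).Nodup) :
    (pvPass g t).1.foldl (fun l a => l.erase a) (t.map Prod.fst)
      = (pvPass g t).2.map Prod.fst := by
  induction t generalizing g with
  | nil => simp [pvPass]
  | cons p t' ih =>
    obtain ⟨i, ov⟩ := p
    simp only [List.map_cons, List.nodup_cons] at hnd
    obtain ⟨hi, hnd'⟩ := hnd
    simp only [pvPass]
    split
    · simp only [List.map_cons, List.foldl_cons]
      rw [show ((i : Int) :: t'.map Prod.fst).erase i = t'.map Prod.fst by simp [List.erase_cons]]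
      exact ih _ hnd'
    · have hiS : i ∉ (pvPass g t').1 := fun h => hi (pvPass_fst_subset _ _ _ h)
      simp only [List.map_cons]
      rw [foldl_erase_cons_of_not_mem _ _ _ hiS, ih _ hnd']

lemma pvPassA_eq (items : List (Int × List Int)) :
    ∀ (grp added allIdx : List Int), (items.map Prod.fst).Nodup →
      pvPassA items grp added allIdx =
        (grp ++ (pvPass grp (items.filter (fun p => !(added.contains p.1)))).1,
         added ++ (pvPass grp (items.filter (fun p => !(added.contains p.1)))).1,
         (pvPass grp (items.filter (fun p => !(added.contains p.1)))).1.foldl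
           (fun l a => l.erase a) allIdx) := by
  induction items with
  | nil => intro grp added allIdx _; simp [pvPassA, pvPass]
  | cons p t ih =>
    intro grp added allIdx hnd
    obtain ⟨i, ov⟩ := p
    simp only [List.map_cons, List.nodup_cons] at hnd
    obtain ⟨hi, hnd'⟩ := hnd
    by_cases hadd : added.contains i
    · have hf : List.filter (fun p => !(added.contains p.1)) ((i, ov) :: t)
          = t.filter (fun p => !(added.contains p.1)) := by
        simpa [List.filter_cons] using hadd
      simp only [pvPassA]
      rw [if_pos hadd, hf]
      exact ih grp added allIdx hnd'
    · have hf : List.filter (fun p => !(added.contains p.1)) ((i, ov) :: t)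
          = (i, ov) :: t.filter (fun p => !(added.contains p.1)) := by
        simp only [Bool.not_eq_true] at hadd
        simpa [List.filter_cons] using hadd
      simp only [pvPassA]
      rw [if_neg hadd, hf, pvInnerAdd_eq_all]
      by_cases hok : grp.all (fun j => !(ov.contains j))
      · have hfilt : t.filter (fun p => !((added ++ [i]).contains p.1))
            = t.filter (fun p => !(added.contains p.1)) := by
          apply List.filter_congr
          intro p hp
          have hpi : p.1 ≠ i := fun h => hi (h ▸ (List.mem_map.mpr ⟨p, hp, rfl⟩))
          simp [List.contains_append, hpi]
        have h2 := ih (grp ++ [i]) (added ++ [i]) (allIdx.erase i) hnd'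
        rw [hfilt] at h2
        have hp : pvPass grp ((i, ov) :: t.filter (fun p => !(added.contains p.1)))
            = (i :: (pvPass (grp ++ [i]) (t.filter (fun p => !(added.contains p.1)))).1,
               (pvPass (grp ++ [i]) (t.filter (fun p => !(added.contains p.1)))).2) := by
          simp only [pvPass]; rw [if_pos hok]
        rw [if_pos hok, h2, hp]
        simp
      · have hp : pvPass grp ((i, ov) :: t.filter (fun p => !(added.contains p.1)))
            = ((pvPass grp (t.filter (fun p => !(added.contains p.1)))).1,
               (i, ov) :: (pvPass grp (t.filter (fun p => !(added.contains p.1)))).2) := by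
          simp only [pvPass]; rw [if_neg hok]
        rw [if_neg hok, ih grp added allIdx hnd', hp]

lemma ff_cons (t : List (Int × List Int)) :
    ∀ (g : List Int) (gs : List (List Int)),
      t.foldl (fun groups p => pvPlace groups p.1 p.2) (g :: gs)
        = (g ++ (pvPass g t).1) ::
          (pvPass g t).2.foldl (fun groups p => pvPlace groups p.1 p.2) gs := by
  induction t with
  | nil => intro g gs; simp [pvPass]
  | cons p t' ih =>
    intro g gs
    obtain ⟨i, ov⟩ := p
    simp only [List.foldl_cons, pvPlace, pvPass]
    by_cases hok : g.all (fun j => !(ov.contains j))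
    · rw [if_pos hok, if_pos hok, ih (g ++ [i]) gs]
      simp
    · rw [if_neg hok, if_neg hok, ih g (pvPlace gs i ov)]
      simp

lemma ff_step (rem : List (Int × List Int)) (hne : rem ≠ []) :
    rem.foldl (fun groups p => pvPlace groups p.1 p.2) []
      = (pvPass [] rem).1 ::
        (pvPass [] rem).2.foldl (fun groups p => pvPlace groups p.1 p.2) [] := by
  cases rem with
  | nil => exact absurd rfl hne
  | cons p t =>
    obtain ⟨i, ov⟩ := p
    simp only [List.foldl_cons, pvPlace, pvPass, List.all_nil, if_pos trivial]
    rw [ff_cons t [i] []]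
    simp

lemma pvLoopA_eq (fuel : Nat) :
    ∀ (items : List (Int × List Int)) (added : List Int) (rem : List (Int × List Int))
      (groups : List (List Int)),
      (items.map Prod.fst).Nodup →
      rem = items.filter (fun p => !(added.contains p.1)) →
      rem.length ≤ fuel →
      pvLoopA fuel items added (rem.map Prod.fst) groups
        = groups ++ rem.foldl (fun groups p => pvPlace groups p.1 p.2) [] := by
  induction fuel with
  | zero =>
    intro items added rem groups _ _ hlen
    have : rem = [] := List.length_eq_zero_iff.mp (Nat.le_zero.mp hlen)
    subst this
    simp [pvLoopA]
  | succ fuel ih =>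
    intro items added rem groups hnd hrem hlen
    by_cases hne : rem = []
    · subst hne; simp [pvLoopA]
    · have hnd_rem : (rem.map Prod.fst).Nodup := by
        rw [hrem]
        exact hnd.sublist (List.Sublist.map _ List.filter_sublist)
      have hiE : ((rem.map Prod.fst).isEmpty) = false := by
        cases rem with
        | nil => exact absurd rfl hne
        | cons a l => simp
      simp only [pvLoopA, hiE]
      rw [if_neg (by simp)]
      have hpa := pvPassA_eq items [] added (rem.map Prod.fst) hnd
      rw [← hrem] at hpa
      rw [hpa]
      have hRfilt : (pvPass [] rem).2 = rem.filter (fun p => !((pvPass [] rem).1.contains p.1)) :=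
        pvPass_snd_eq [] rem hnd_rem
      have hRmap : (pvPass [] rem).1.foldl (fun l a => l.erase a) (rem.map Prod.fst)
          = (pvPass [] rem).2.map Prod.fst := pvPass_erase [] rem hnd_rem
      have hRfull : (pvPass [] rem).2
          = items.filter (fun p => !((added ++ (pvPass [] rem).1).contains p.1)) := by
        rw [hRfilt, hrem, List.filter_filter]
        apply List.filter_congr
        intro p _
        simp [List.contains_append, Bool.not_or, Bool.and_comm]
      have hRlen : (pvPass [] rem).2.length ≤ fuel := by
        have hlt : (pvPass [] rem).2.length < rem.length := by
          cases rem with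
          | nil => exact absurd rfl hne
          | cons p t =>
            obtain ⟨i, ov⟩ := p
            have hndt : (t.map Prod.fst).Nodup := by
              simp only [List.map_cons, List.nodup_cons] at hnd_rem
              exact hnd_rem.2
            have hps : (pvPass [] ((i, ov) :: t)).2 = (pvPass [i] t).2 := by
              simp [pvPass]
            rw [hps, pvPass_snd_eq [i] t hndt]
            have := List.length_filter_le (fun p => !((pvPass [i] t).1.contains p.1)) t
            simp only [List.length_cons]
            omega
        omega
      rw [hRmap]
      rw [ih items (added ++ (pvPass [] rem).1) (pvPass [] rem).2 (groups ++ [[] ++ (pvPass [] rem).1]) hnd hRfull hRlen]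
      rw [ff_step rem hne]
      simp

-- ===== VERDICT (by name: the statement is the Claim_ definition above) =====
theorem get_overlap_groups_spec : Claim_equal_get_overlap_groups := by
  intro overlap_idx _ hpre
  unfold Spec_get_overlap_groups get_overlap_groups get_overlap_groups_alt
  have h := pvLoopA_eq (overlap_idx.map Prod.fst).length overlap_idx [] overlap_idx []
    hpre (by simp) (by simp)
  simp only [List.length_map] at h ⊢
  rw [h]
  simp
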